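-- pv_equiv track=rewrite | github.com/mzpor/sys2 | src/KEY GAME.PY | build_buttons
-- ===== SOURCE A (Python) =====
-- def build_buttons(count):
--     rows = []
--     row = []
--     for i in range(1, count + 1):
--         row.append(f"گزینه {i}")
--         if len(row) == 3:
--             rows.append(row)
--             row = []
--     if row:
--         rows.append(row)
--     return rows
-- ===== SOURCE B (Python) =====
-- def build_buttons(count):
--     labels = [f"گزینه {i}" for i in range(1, count + 1)]
--     return [labels[i:i + 3] for i in range(0, len(labels), 3)]
-- ===== Notes on version B (the rewrite author's own statement) =====
-- stated objective: simpler
-- what changed: Replaces the accumulate-and-flush loop with running row state by a two-pass build-then-chunk: build all labels with one comprehension, then slice them into rows of three by stepped indices.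
import Mathlib
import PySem

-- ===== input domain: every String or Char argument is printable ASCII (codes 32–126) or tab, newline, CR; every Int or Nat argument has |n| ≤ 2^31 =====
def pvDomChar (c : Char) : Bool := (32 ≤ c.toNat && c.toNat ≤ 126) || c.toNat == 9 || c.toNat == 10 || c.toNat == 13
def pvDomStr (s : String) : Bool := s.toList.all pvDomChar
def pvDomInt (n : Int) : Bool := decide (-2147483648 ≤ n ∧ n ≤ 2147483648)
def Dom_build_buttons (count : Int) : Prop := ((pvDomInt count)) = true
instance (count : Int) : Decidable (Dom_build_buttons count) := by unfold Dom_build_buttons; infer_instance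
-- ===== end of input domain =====

-- B replaces A's accumulate-and-flush loop by a build-then-chunk two-pass (all labels, then stepped slices); simpler decomposition, same O(n) cost.


-- label i = f"گزینه {i}"
def pvLabel (i : Int) : String := "گزینه " ++ PySem.Int.toStr i

-- ===== PORT A =====
def build_buttons (count : Int) : List (List String) :=
  let st := (PySem.List.pyRange 1 (count + 1) 1).foldl
    (fun (p : List (List String) × List String) i =>
      let row := p.2 ++ [pvLabel i]
      if row.length == 3 then (p.1 ++ [row], ([] : List String)) else (p.1, row))
    ([], [])
  if st.2.isEmpty then st.1 else st.1 ++ [st.2]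

-- ===== PORT B =====
def build_buttons_alt (count : Int) : List (List String) :=
  let labels := (PySem.List.pyRange 1 (count + 1) 1).map pvLabel
  (PySem.List.pyRange 0 (labels.length : Int) 3).map
    (fun i => PySem.List.slice labels (some i) (some (i + 3)))

-- ===== PRECONDITION & SPEC =====
def Spec_build_buttons (count : Int) (out : List (List String)) : Prop := out = build_buttons_alt count
instance (count : Int) (out : List (List String)) : Decidable (Spec_build_buttons count out) := by unfold Spec_build_buttons; infer_instance

-- ===== CLAIM (what is proved, stated in full; the proofs are below) =====
def Claim_equal_build_buttons : Prop := ∀ (count : Int), Dom_build_buttons count → Spec_build_buttons count (build_buttons count)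

-- ===== LEMMAS AND PROOFS =====

-- reference chunking: rows of 3, last row short (structural recursion)
def pvChunks3 {α : Type} : List α → List (List α)
  | [] => []
  | [a] => [[a]]
  | [a, b] => [[a, b]]
  | a :: b :: c :: rest => [a, b, c] :: pvChunks3 rest

theorem pvChunks3_small {α : Type} (l : List α) (h : l.length ≤ 3) (hne : l ≠ []) :
    pvChunks3 l = [l] := by
  match l with
  | [] => exact absurd rfl hne
  | [a] => rfl
  | [a, b] => rfl
  | [a, b, c] => rfl
  | a :: b :: c :: d :: rest =>
    simp only [List.length_cons] at h
    omega

theorem pvChunks3_append3 {α : Type} (r xs : List α) (h : r.length = 3) :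
    pvChunks3 (r ++ xs) = r :: pvChunks3 xs := by
  match r, h with
  | [a, b, c], _ => rfl

theorem pyRange3_cons (a b : Int) (h : a < b) :
    PySem.List.pyRange a b 3 = a :: PySem.List.pyRange (a + 3) b 3 := by
  rw [PySem.List.pyRange_of_pos a b (by norm_num), PySem.List.pyRange_of_pos (a + 3) b (by norm_num)]
  rw [if_pos h]
  by_cases h3 : a + 3 < b
  · rw [if_pos h3]
    have hM : ((b - a + 3 - 1) / 3).toNat = ((b - (a + 3) + 3 - 1) / 3).toNat + 1 := by omega
    rw [hM, List.range_succ_eq_map, List.map_cons, List.map_map]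
    congr 1
    · simp
    · apply List.map_congr_left
      intro k _
      simp only [Function.comp_apply]
      push_cast
      ring
  · rw [if_neg h3]
    have hM : ((b - a + 3 - 1) / 3).toNat = 1 := by omega
    rw [hM]
    simp [List.range_succ]

theorem pvBside {α : Type} : ∀ (n : Nat) (l : List α), l.length ≤ n →
    (PySem.List.pyRange 0 (l.length : Int) 3).map
      (fun i => PySem.List.slice l (some i) (some (i + 3))) = pvChunks3 l := by
  intro n
  induction n with
  | zero =>
    intro l hl
    have : l = [] := List.eq_nil_of_length_eq_zero (by omega)
    subst this
    simp [PySem.List.pyRange_of_pos 0 0 (by norm_num : (0 : Int) < 3), pvChunks3]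
  | succ n ih =>
    intro l hl
    cases l with
    | nil => simp [PySem.List.pyRange_of_pos 0 0 (by norm_num : (0 : Int) < 3), pvChunks3]
    | cons x xs =>
      have hpos : (0 : Int) < ((x :: xs).length : Int) := by simp
      rw [pyRange3_cons 0 _ hpos, List.map_cons]
      have h0 : PySem.List.slice (x :: xs) (some 0) (some (0 + 3)) = (x :: xs).take 3 := by
        rw [show ((0 : Int) + 3) = ((3 : Nat) : Int) by norm_num]
        simp [PySem.List.slice_to]
      rw [h0]
      have hshift : (PySem.List.pyRange (0 + 3) ((x :: xs).length : Int) 3).map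
          (fun i => PySem.List.slice (x :: xs) (some i) (some (i + 3)))
          = (PySem.List.pyRange 0 (((x :: xs).drop 3).length : Int) 3).map
            (fun i => PySem.List.slice ((x :: xs).drop 3) (some i) (some (i + 3))) := by
        by_cases hlong : 3 < (x :: xs).length
        · have hlI : (3 : Int) < ((x :: xs).length : Int) := by exact_mod_cast hlong
          have hlen3 : ((((x :: xs).drop 3).length : Nat) : Int) = ((x :: xs).length : Int) - 3 := by
            simp only [List.length_drop]
            omega
          have e1 : PySem.List.pyRange (0 + 3) ((x :: xs).length : Int) 3
              = (PySem.List.pyRange 0 (((x :: xs).drop 3).length : Int) 3).map (· + 3) := by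
            rw [PySem.List.pyRange_of_pos (0 + 3) _ (by norm_num : (0 : Int) < 3),
                PySem.List.pyRange_of_pos 0 _ (by norm_num : (0 : Int) < 3), List.map_map]
            rw [hlen3]
            rw [if_pos (by omega), if_pos (by omega)]
            have hC : ((((x :: xs).length : Int) - (0 + 3) + 3 - 1) / 3).toNat
                = ((((x :: xs).length : Int) - 3 - 0 + 3 - 1) / 3).toNat := by omega
            rw [hC]
            apply List.map_congr_left
            intro k _
            simp only [Function.comp_apply]
            ring
          rw [e1, List.map_map]
          apply List.map_congr_left
          intro i hi
          have hi0 : 0 ≤ i :=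
            ((PySem.List.mem_pyRange_iff_of_pos (by norm_num : (0 : Int) < 3) i).mp hi).1
          simp only [Function.comp_apply]
          rw [PySem.List.slice_toNat, PySem.List.slice_toNat, List.drop_drop]
          · congr 1
            · omega
            · congr 1
              omega
          all_goals omega
        · have hd : (x :: xs).drop 3 = [] := by
            apply List.eq_nil_of_length_eq_zero
            simp only [List.length_drop]
            omega
          have hr : PySem.List.pyRange (0 + 3) ((x :: xs).length : Int) 3 = [] := by
            rw [PySem.List.pyRange_of_pos _ _ (by norm_num : (0 : Int) < 3)]
            have : ((x :: xs).length : Int) ≤ 3 := by exact_mod_cast Nat.not_lt.mp hlong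
            rw [if_neg (by omega)]
            simp
          rw [hr, hd]
          simp [PySem.List.pyRange_of_pos 0 0 (by norm_num : (0 : Int) < 3)]
      rw [hshift, ih _ (by simp only [List.length_drop, List.length_cons] at hl ⊢; omega)]
      match xs with
      | [] => rfl
      | [y] => rfl
      | y :: z :: zs => rfl

-- A's loop body as a named function (definitionally equal to the port's lambda)
def pvStep {α : Type} (p : List (List α) × List α) (s : α) : List (List α) × List α :=
  let row := p.2 ++ [s]
  if row.length == 3 then (p.1 ++ [row], ([] : List α)) else (p.1, row)

-- A's loop with accumulator invariant: the pending row is shorter than 3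
theorem pvAside {α : Type} : ∀ (l : List α) (rows : List (List α)) (row : List α),
    row.length < 3 →
    (let st := l.foldl pvStep (rows, row)
     if st.2.isEmpty then st.1 else st.1 ++ [st.2])
    = rows ++ pvChunks3 (row ++ l) := by
  intro l
  induction l with
  | nil =>
    intro rows row hrow
    simp only [List.foldl_nil, List.append_nil]
    cases row with
    | nil => simp [pvChunks3]
    | cons a as =>
      rw [pvChunks3_small _ (by omega) (by simp)]
      simp
  | cons x xs ih =>
    intro rows row hrow
    rw [List.foldl_cons]
    by_cases h3 : (row ++ [x]).length = 3
    · have hstep : pvStep (rows, row) x = (rows ++ [row ++ [x]], []) := by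
        simp [pvStep, h3]
      rw [hstep, ih (rows ++ [row ++ [x]]) [] (by norm_num)]
      rw [show row ++ x :: xs = (row ++ [x]) ++ xs by simp]
      rw [pvChunks3_append3 _ _ h3]
      simp
    · have hstep : pvStep (rows, row) x = (rows, row ++ [x]) := by
        have h2 : ¬ row.length = 2 := by
          simp only [List.length_append, List.length_cons, List.length_nil] at h3
          omega
        simp [pvStep, h2]
      rw [hstep, ih rows (row ++ [x])
        (by simp only [List.length_append, List.length_cons, List.length_nil] at h3 ⊢; omega)]
      simp

-- ===== VERDICT (by name: the statement is the Claim_ definition above) =====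
theorem build_buttons_spec : Claim_equal_build_buttons := by
  intro count _
  show build_buttons count = build_buttons_alt count
  have hA := pvAside ((PySem.List.pyRange 1 (count + 1) 1).map pvLabel) [] [] (by norm_num)
  rw [List.foldl_map] at hA
  have hA' : build_buttons count
      = [] ++ pvChunks3 ([] ++ (PySem.List.pyRange 1 (count + 1) 1).map pvLabel) := hA
  have hB : build_buttons_alt count
      = pvChunks3 ((PySem.List.pyRange 1 (count + 1) 1).map pvLabel) :=
    pvBside _ _ le_rfl
  rw [hA', hB]
  simp
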